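-- pv_equiv track=rewrite | github.com/drpeterfoster/adventofcode24 | day19.py | find_combinations2
-- ===== SOURCE A (Python) =====
-- from functools import lru_cache
--
-- def find_combinations2(substrings, target):
--     @lru_cache(None)
--     def backtrack(target):
--         cando = 0
--         if target == "":
--             return 1
--         for substring in substrings.get(target[0], []):
--             if target.startswith(substring):
--                 cando += backtrack(target[len(substring) :])
--         return cando
--
--     result = backtrack(target)
--     return result
-- ===== SOURCE B (Python) =====
-- def find_combinations2(substrings, target):
--     n = len(target)
--     dp = [0] * (n + 1)
--     dp[n] = 1
--     for i in range(n - 1, -1, -1):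
--         total = 0
--         for s in substrings.get(target[i], []):
--             if target.startswith(s, i):
--                 total += dp[i + len(s)]
--         dp[i] = total
--     return dp[0]
-- ===== Notes on version B (the rewrite author's own statement) =====
-- stated objective: alternative
-- what changed: Replaced the lru_cache-memoized top-down recursion on suffix strings with a bottom-up array DP indexed by position: dp[i] = sum of dp[i+len(s)] over candidates s for target[i] with target.startswith(s, i).
-- outside the precondition, e.g. on find_combinations2({'b': ['']}, 'ab'): A returns 0, B returns 0; on find_combinations2({'a': ['']}, 'ba'): A returns 0, B returns 0
import Mathlib
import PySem

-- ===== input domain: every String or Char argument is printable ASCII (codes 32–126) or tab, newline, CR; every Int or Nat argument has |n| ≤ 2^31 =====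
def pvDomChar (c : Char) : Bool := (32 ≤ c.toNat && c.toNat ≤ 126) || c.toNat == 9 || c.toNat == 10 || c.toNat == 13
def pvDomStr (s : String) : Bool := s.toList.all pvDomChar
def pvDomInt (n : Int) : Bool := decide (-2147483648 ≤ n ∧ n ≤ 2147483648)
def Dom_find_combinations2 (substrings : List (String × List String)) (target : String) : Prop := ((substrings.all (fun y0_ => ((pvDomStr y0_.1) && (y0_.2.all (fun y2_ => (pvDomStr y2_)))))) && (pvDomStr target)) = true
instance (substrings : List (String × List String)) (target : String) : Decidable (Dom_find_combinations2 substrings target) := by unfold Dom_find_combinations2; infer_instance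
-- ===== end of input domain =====

-- B replaces A's memoized top-down recursion on suffix strings by a bottom-up array DP over
-- positions (objective: alternative); equal return values on Pre_ (no reachable empty candidate).

-- ===== PORT A =====
-- memoized recursion on the remaining suffix; fuel is only a totality guard
-- (with Pre_ each recursive call shortens the suffix, so fuel = length+1 never runs out)
def backtrackA (substrings : List (String × List String)) : Nat → List Char → Int
  | 0, _ => 0
  | fuel+1, t =>
    match t with
    | [] => 1
    | c :: _ =>
      ((PySem.Dict.ofList substrings).getD (String.ofList [c]) []).foldl
        (fun cando substring =>
          if PySem.Chars.startswith t substring.toList then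
            cando + backtrackA substrings fuel (t.drop substring.toList.length)
          else cando) 0

def find_combinations2 (substrings : List (String × List String)) (target : String) : Int :=
  backtrackA substrings (target.toList.length + 1) target.toList

-- ===== PORT B =====
-- bottom-up DP: altDP builds the dp table back-to-front; the cell for position i is
-- consed onto the table for positions i+1..n; while cell i is being summed it still holds 0,
-- so the array seen at step i is (0 :: dp) and dp[i+len s] is (0 :: dp) at index len s
def altDP (substrings : List (String × List String)) : List Char → List Int
  | [] => [1]
  | c :: rest =>
    let dp := altDP substrings rest
    (((PySem.Dict.ofList substrings).getD (String.ofList [c]) []).foldl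
      (fun total s =>
        if PySem.Chars.startswith (c :: rest) s.toList then
          total + ((0 :: dp).getD s.toList.length 0)
        else total) 0) :: dp

def find_combinations2_alt (substrings : List (String × List String)) (target : String) : Int :=
  (altDP substrings target.toList).headD 0

-- ===== PRECONDITION & SPEC =====
-- Pre_ excludes inputs where some character of the target is keyed (in substrings) to a
-- candidate list containing the empty string: when such a position is reached, A's recursion
-- calls itself on the same suffix and raises RecursionError (B returns a value there); when no
-- such position is reached A returns normally, so Pre_ is slightly narrower than the raising set.
def Pre_find_combinations2 (substrings : List (String × List String)) (target : String) : Prop :=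
  (target.toList.all (fun c =>
    substrings.all (fun p => p.1 != String.ofList [c] || !(p.2.contains "")))) = true
instance (substrings : List (String × List String)) (target : String) : Decidable (Pre_find_combinations2 substrings target) := by unfold Pre_find_combinations2; infer_instance

def pvWitness_find_combinations2 : (List (String × List String)) × String :=
  ([("a", ["a", "ab"]), ("b", ["b"])], "ab")

def Spec_find_combinations2 (substrings : List (String × List String)) (target : String) (out : Int) : Prop := out = find_combinations2_alt substrings target
instance (substrings : List (String × List String)) (target : String) (out : Int) : Decidable (Spec_find_combinations2 substrings target out) := by unfold Spec_find_combinations2; infer_instance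

-- ===== CLAIM (what is proved, stated in full; the proofs are below) =====
def Claim_equal_find_combinations2 : Prop := ∀ (substrings : List (String × List String)) (target : String), Dom_find_combinations2 substrings target → Pre_find_combinations2 substrings target → Spec_find_combinations2 substrings target (find_combinations2 substrings target)

-- ===== LEMMAS AND PROOFS =====

-- a successful lookup in d.update l comes from d or from a pair of l with that key
lemma get?_update_cases {κ ν : Type} [BEq κ] [LawfulBEq κ] [DecidableEq κ]
    (l : List (κ × ν)) (d : PySem.Dict κ ν) (k : κ) (v : ν)
    (h : (d.update l).get? k = some v) : d.get? k = some v ∨ ∃ p ∈ l, p.1 = k ∧ p.2 = v := by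
  induction l generalizing d with
  | nil => exact Or.inl h
  | cons p rest ih =>
    rcases ih (d.insert p.1 p.2) h with h' | ⟨q, hq, hq1, hq2⟩
    · rw [PySem.Dict.get?_insert] at h'
      by_cases hk : k = p.1
      · rw [if_pos hk] at h'
        exact Or.inr ⟨p, List.mem_cons_self, hk.symm, Option.some.inj h'⟩
      · rw [if_neg hk] at h'
        exact Or.inl h'
    · exact Or.inr ⟨q, List.mem_cons_of_mem _ hq, hq1, hq2⟩

lemma mem_getD_ofList (ss : List (String × List String)) (k : String) (s : String)
    (h : s ∈ (PySem.Dict.ofList ss).getD k []) : ∃ p ∈ ss, p.1 = k ∧ s ∈ p.2 := by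
  rcases hg : (PySem.Dict.ofList ss).get? k with _ | v
  · rw [PySem.Dict.getD_of_get?_eq_none _ _ hg] at h; cases h
  · rw [PySem.Dict.getD_of_get?_eq_some _ _ hg] at h
    rcases get?_update_cases ss PySem.Dict.empty k v hg with h' | ⟨p, hp, hp1, rfl⟩
    · rw [PySem.Dict.get?_empty] at h'; cases h'
    · exact ⟨p, hp, hp1, h⟩

-- unpack the Boolean Pre_ into the statement the main lemma consumes
lemma pre_elim (ss : List (String × List String)) (t : String)
    (h : Pre_find_combinations2 ss t) (c : Char) (hc : c ∈ t.toList)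
    (p : String × List String) (hp : p ∈ ss) (h1 : p.1 = String.ofList [c]) : "" ∉ p.2 := by
  unfold Pre_find_combinations2 at h
  rw [List.all_eq_true] at h
  have h2 := (List.all_eq_true.mp (h c hc)) p hp
  rw [h1] at h2
  simp only [bne_self_eq_false, Bool.false_or, Bool.not_eq_true'] at h2
  simpa using h2

lemma getD_eq_headD_drop (l : List Int) (k : Nat) : l.getD k 0 = (l.drop k).headD 0 := by
  induction l generalizing k with
  | nil => simp
  | cons a l _ =>
    cases k with
    | zero => simp
    | succ k => simp

lemma altDP_drop (ss : List (String × List String)) (t : List Char) (k : Nat) (hk : k ≤ t.length) :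
    (altDP ss t).drop k = altDP ss (t.drop k) := by
  induction t generalizing k with
  | nil =>
    have : k = 0 := by simpa using hk
    subst this; simp
  | cons c rest ih =>
    cases k with
    | zero => simp
    | succ k =>
      simp only [altDP, List.drop_succ_cons]
      exact ih k (by simpa using hk)

lemma main_lemma (ss : List (String × List String)) (fuel : Nat) (t : List Char)
    (hpre : ∀ c ∈ t, ∀ p ∈ ss, p.1 = String.ofList [c] → "" ∉ p.2)
    (hf : t.length < fuel) :
    backtrackA ss fuel t = (altDP ss t).headD 0 := by
  induction fuel generalizing t with
  | zero => omega
  | succ fuel ih =>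
    cases t with
    | nil => simp [backtrackA, altDP]
    | cons c rest =>
      simp only [backtrackA, altDP, List.headD_cons]
      -- the two folds agree step by step
      have key : ∀ (L : List String), (∀ s ∈ L, s ≠ "") → ∀ (acc : Int),
          L.foldl (fun cando substring =>
            if PySem.Chars.startswith (c :: rest) substring.toList then
              cando + backtrackA ss fuel ((c :: rest).drop substring.toList.length)
            else cando) acc
          = L.foldl (fun total s =>
            if PySem.Chars.startswith (c :: rest) s.toList then
              total + ((0 : Int) :: altDP ss rest).getD s.toList.length 0
            else total) acc := by
        intro L hL
        induction L with
        | nil => intro acc; rfl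
        | cons s L ihL =>
          intro acc
          have hne : s ≠ "" := hL s List.mem_cons_self
          have hL' : ∀ s ∈ L, s ≠ "" := fun x hx => hL x (List.mem_cons_of_mem _ hx)
          by_cases hsw : PySem.Chars.startswith (c :: rest) s.toList = true
          · have hpref : s.toList <+: (c :: rest) := (PySem.Chars.startswith_iff _ _).mp hsw
            have hlen : s.toList.length ≤ rest.length + 1 := by
              simpa using hpref.length_le
            have hpos : s.toList ≠ [] := by simpa using hne
            have hpos' : 1 ≤ s.toList.length := List.length_pos_iff.mpr hpos
            obtain ⟨m, hm⟩ : ∃ m, s.toList.length = m + 1 := ⟨s.toList.length - 1, by omega⟩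
            have hrec : backtrackA ss fuel ((c :: rest).drop s.toList.length)
                = ((0 : Int) :: altDP ss rest).getD s.toList.length 0 := by
              have hflt : ((c :: rest).drop s.toList.length).length < fuel := by
                rw [List.length_drop]
                simp only [List.length_cons] at hf ⊢
                omega
              have hpre' : ∀ c' ∈ (c :: rest).drop s.toList.length,
                  ∀ p ∈ ss, p.1 = String.ofList [c'] → "" ∉ p.2 :=
                fun c' hc' => hpre c' (List.mem_of_mem_drop hc')
              rw [ih ((c :: rest).drop s.toList.length) hpre' hflt, hm, List.drop_succ_cons,
                List.getD_cons_succ, getD_eq_headD_drop, altDP_drop ss rest m (by omega)]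
            simp only [List.foldl_cons, if_pos hsw, hrec]
            exact ihL hL' _
          · simp only [List.foldl_cons, if_neg hsw]
            exact ihL hL' _
      refine key _ (fun s hs h0 => ?_) 0
      rcases mem_getD_ofList ss _ s hs with ⟨p, hp, hp1, hsp⟩
      exact hpre c List.mem_cons_self p hp hp1 (h0 ▸ hsp)

-- ===== VERDICT (by name: the statement is the Claim_ definition above) =====
theorem find_combinations2_spec : Claim_equal_find_combinations2 := by
  intro ss t _ hpre
  unfold Spec_find_combinations2 find_combinations2 find_combinations2_alt
  exact main_lemma ss _ _ (fun c hc p hp h1 => pre_elim ss t hpre c hc p hp h1) (Nat.lt_succ_self _)
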